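-- pv_equiv track=rewrite | github.com/1511abhay/BEEE_CU_Evaluation | autocalibrate.py | update_instr
-- ===== SOURCE A (Python) =====
-- def update_instr(instr: str) -> str:
--     instr = instr.strip()
--
--      # Check if instruction starts with "TBL", "TBX", "EXT", or "SPLICE"
--     if not any(instr.startswith(x) for x in ["TBL", "TBX", "EXT", "SPLICE"]):
--         return instr
--
--
--
--     # Split the operands of the instruction
--     operands = instr.split()[1:]
--     num_operands = len(operands)
--
--     # Count the number of "V" or "Z" present in the instruction except for the first "V" or "Z"
--     if instr.startswith("TBL") or instr.startswith("TBX"):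
--         var_prefix = "V"
--     else:
--         var_prefix = "Z"
--
--     num_vars = 0
--     for i in range(1, num_operands):
--         if operands[i].startswith(var_prefix):
--             num_vars += 1
--
--     # Replace the second "V" or "Z" onwards with a sequence of "V" or "Z" starting from 0 to the total number of "V" or "Z" minus one
--     var_counter = 0
--     for i in range(1, num_operands):
--         if operands[i].startswith(var_prefix):
--             old_var_operand = operands[i]
--             new_var_operand = var_prefix + str(
--                 var_counter) + old_var_operand[old_var_operand.index("."):]
--             operands[i] = new_var_operand
--             var_counter += 1
--     if instr.startswith("TBL"):
--         var_prefix = "Z"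
--     num_vars = 0
--     for i in range(1, num_operands):
--         if operands[i].startswith(var_prefix):
--             num_vars += 1
--
--     # Replace the second "V" or "Z" onwards with a sequence of "V" or "Z" starting from 0 to the total number of "V" or "Z" minus one
--     var_counter = 0
--     for i in range(1, num_operands):
--         if operands[i].startswith(var_prefix):
--             old_var_operand = operands[i]
--             new_var_operand = var_prefix + str(
--                 var_counter) + old_var_operand[old_var_operand.index("."):]
--             operands[i] = new_var_operand
--             var_counter += 1
--     # Combine the modified operands and join with the instruction to form the final instruction
--     instr = " ".join([instr.split()[0]] + operands)
--     return instr
-- ===== SOURCE B (Python) =====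
-- def update_instr(instr: str) -> str:
--     s = instr.strip()
--
--     # pick the operand prefixes to renumber from the mnemonic
--     if s.startswith("TBL"):
--         prefixes = ["V", "Z"]
--     elif s.startswith("TBX"):
--         prefixes = ["V"]
--     elif s.startswith("EXT") or s.startswith("SPLICE"):
--         prefixes = ["Z"]
--     else:
--         return s
--
--     parts = s.split()
--     counters = {p: 0 for p in prefixes}
--     out = parts[:2]
--     for op in parts[2:]:
--         for p in prefixes:
--             if op.startswith(p):
--                 op = p + str(counters[p]) + op[op.index("."):]
--                 counters[p] += 1
--                 break
--         out.append(op)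
--     return " ".join(out)
-- ===== Notes on version B (the rewrite author's own statement) =====
-- stated objective: simpler
-- what changed: A makes four sequential index loops over the operand list (two dead counting loops and two renumbering passes, the second of which is redundant for TBX/EXT/SPLICE); B reads the set of prefixes to renumber off the mnemonic once and renumbers in a single pass with a per-prefix counter dictionary.
import Mathlib
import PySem

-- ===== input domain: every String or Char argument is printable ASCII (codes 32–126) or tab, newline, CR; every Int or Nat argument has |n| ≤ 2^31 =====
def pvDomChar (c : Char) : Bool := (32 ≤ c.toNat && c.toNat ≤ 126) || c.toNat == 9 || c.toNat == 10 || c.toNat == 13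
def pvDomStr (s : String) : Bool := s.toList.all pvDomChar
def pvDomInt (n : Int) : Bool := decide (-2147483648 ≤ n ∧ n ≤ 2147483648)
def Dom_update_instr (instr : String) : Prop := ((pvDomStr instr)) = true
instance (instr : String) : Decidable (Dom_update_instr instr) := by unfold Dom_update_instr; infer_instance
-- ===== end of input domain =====

-- B replaces A's four sequential index loops (two dead counting loops, a renumber pass, and a
-- second — partly redundant — renumber pass) by one counted pass over the operands with a
-- per-prefix counter dictionary (objective: simpler).

-- ===== PORT A =====
-- the dead counting loop 'num_vars = 0; for i in range(1, num_operands): ...' (value never used)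
def aCount (p : String) (ops : List String) : Int :=
  ops.foldl (fun n op => if PySem.Str.startswith op p then n + 1 else n) 0

-- the renumbering loop body over operands[i], i = 1 .. num_operands-1, as structural recursion;
-- Python's old_var_operand.index(".") raises ValueError when '.' is absent — ported as
-- PySem.Str.find (exact whenever '.' occurs; the raising inputs are excluded by Pre_ below)
def aPass (p : String) (ctr : Int) : List String → List String
  | [] => []
  | op :: rest =>
    if PySem.Str.startswith op p then
      (p ++ PySem.Int.toStr ctr ++ PySem.Str.slice op (some (PySem.Str.find op ".")) none)
        :: aPass p (ctr + 1) rest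
    else
      op :: aPass p ctr rest

-- one whole Python renumbering pass: index 0 of `operands` is never touched
def aLoop (p : String) : List String → List String
  | [] => []
  | op0 :: rest => op0 :: aPass p 0 rest

def update_instr (instr : String) : String :=
  let s := PySem.Str.strip instr
  if !((["TBL", "TBX", "EXT", "SPLICE"]).any (fun x => PySem.Str.startswith s x)) then s
  else
    let parts := PySem.Str.split₀ s
    let operands := parts.drop 1
    let vp1 := if PySem.Str.startswith s "TBL" || PySem.Str.startswith s "TBX" then "V" else "Z"
    let _numVars1 := aCount vp1 (operands.drop 1)   -- computed and never used, as in A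
    let ops1 := aLoop vp1 operands
    let vp2 := if PySem.Str.startswith s "TBL" then "Z" else vp1
    let _numVars2 := aCount vp2 (ops1.drop 1)       -- computed and never used, as in A
    let ops2 := aLoop vp2 ops1
    PySem.Str.join " " (parts.take 1 ++ ops2)

-- ===== PORT B =====
-- inner 'for p in prefixes: ... break' loop of Source B
def bRenum : List String → PySem.Dict String Int → String → String × PySem.Dict String Int
  | [], ctrs, op => (op, ctrs)
  | p :: ps, ctrs, op =>
    if PySem.Str.startswith op p then
      let c := (PySem.Dict.get? ctrs p).getD 0
      (p ++ PySem.Int.toStr c ++ PySem.Str.slice op (some (PySem.Str.find op ".")) none,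
       PySem.Dict.insert ctrs p (c + 1))
    else bRenum ps ctrs op

def update_instr_alt (instr : String) : String :=
  let s := PySem.Str.strip instr
  let prefixes : Option (List String) :=
    if PySem.Str.startswith s "TBL" then some ["V", "Z"]
    else if PySem.Str.startswith s "TBX" then some ["V"]
    else if PySem.Str.startswith s "EXT" || PySem.Str.startswith s "SPLICE" then some ["Z"]
    else none
  match prefixes with
  | none => s
  | some ps =>
    let parts := PySem.Str.split₀ s
    let counters : PySem.Dict String Int := PySem.Dict.ofList (ps.map (fun p => (p, (0 : Int))))
    let res := (parts.drop 2).foldl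
      (fun st op =>
        let r := bRenum ps st.2 op
        (st.1 ++ [r.1], r.2)) (parts.take 2, counters)
    PySem.Str.join " " res.1

-- ===== PRECONDITION & SPEC =====
-- the operand prefixes that get renumbered, read off the stripped instruction
def prefixesOf (s : String) : List String :=
  if PySem.Str.startswith s "TBL" then ["V", "Z"]
  else if PySem.Str.startswith s "TBX" then ["V"]
  else if PySem.Str.startswith s "EXT" || PySem.Str.startswith s "SPLICE" then ["Z"]
  else []

-- Pre_ excludes exactly the inputs where A raises ValueError: an operand beyond the first that
-- starts with a renumbered prefix but contains no dot character makes the str.index call in the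
-- rewriting step raise (B raises the same ValueError there).
def Pre_update_instr (instr : String) : Prop :=
  ∀ p ∈ prefixesOf (PySem.Str.strip instr),
    ∀ op ∈ (PySem.Str.split₀ (PySem.Str.strip instr)).drop 2,
      PySem.Str.startswith op p = true → PySem.Str.isIn "." op = true
instance (instr : String) : Decidable (Pre_update_instr instr) := by
  unfold Pre_update_instr; infer_instance

def pvWitness_update_instr : String := "TBL X1.q V9.a Z7.b V3.c"

def Spec_update_instr (instr : String) (out : String) : Prop := out = update_instr_alt instr
instance (instr : String) (out : String) : Decidable (Spec_update_instr instr out) := by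
  unfold Spec_update_instr; infer_instance

-- ===== CLAIM (what is proved, stated in full; the proofs are below) =====
def Claim_equal_update_instr : Prop := ∀ (instr : String), Dom_update_instr instr → Pre_update_instr instr → Spec_update_instr instr (update_instr instr)

-- ===== LEMMAS AND PROOFS =====

-- the operand-rewriting expression shared by both Pythons, named for the proofs
def rwS (p : String) (c : Int) (op : String) : String :=
  p ++ PySem.Int.toStr c ++ PySem.Str.slice op (some (PySem.Str.find op ".")) none

lemma rwS_fold (p : String) (c : Int) (op : String) :
    p ++ PySem.Int.toStr c ++ PySem.Str.slice op (some (PySem.Str.find op ".")) none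
      = rwS p c op := rfl

-- B's single combined pass over the TBL operands, as a pure function (proof intermediary)
def pass2 (cv cz : Int) : List String → List String
  | [] => []
  | op :: rest =>
    if PySem.Str.startswith op "V" then rwS "V" cv op :: pass2 (cv + 1) cz rest
    else if PySem.Str.startswith op "Z" then rwS "Z" cz op :: pass2 cv (cz + 1) rest
    else op :: pass2 cv cz rest

def D1 (p : String) (c : Int) : PySem.Dict String Int := ⟨[(p, c)]⟩
def D2 (cv cz : Int) : PySem.Dict String Int := ⟨[("V", cv), ("Z", cz)]⟩

lemma digitChar_ne_dot (m : Nat) : Nat.digitChar m ≠ '.' := by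
  by_cases h16 : m < 16
  · interval_cases m <;> decide
  · have h : Nat.digitChar m = '*' := by
      unfold Nat.digitChar
      simp only [if_neg (show ¬ m = 0 by omega), if_neg (show ¬ m = 1 by omega),
        if_neg (show ¬ m = 2 by omega), if_neg (show ¬ m = 3 by omega),
        if_neg (show ¬ m = 4 by omega), if_neg (show ¬ m = 5 by omega),
        if_neg (show ¬ m = 6 by omega), if_neg (show ¬ m = 7 by omega),
        if_neg (show ¬ m = 8 by omega), if_neg (show ¬ m = 9 by omega),
        if_neg (show ¬ m = 10 by omega), if_neg (show ¬ m = 11 by omega),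
        if_neg (show ¬ m = 12 by omega), if_neg (show ¬ m = 13 by omega),
        if_neg (show ¬ m = 14 by omega), if_neg (show ¬ m = 15 by omega)]
    rw [h]; decide

lemma mem_toDigitsCore (b : Nat) : ∀ (f n : Nat) (acc : List Char) (c : Char),
    c ∈ Nat.toDigitsCore b f n acc → (∃ m, c = Nat.digitChar m) ∨ c ∈ acc := by
  intro f
  induction f with
  | zero => intro n acc c h; exact Or.inr h
  | succ f ih =>
    intro n acc c h
    simp only [Nat.toDigitsCore] at h
    split at h
    · rcases List.mem_cons.mp h with h' | h'
      · exact Or.inl ⟨n % b, h'⟩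
      · exact Or.inr h'
    · rcases ih _ _ _ h with h' | h'
      · exact Or.inl h'
      · rcases List.mem_cons.mp h' with h'' | h''
        · exact Or.inl ⟨n % b, h''⟩
        · exact Or.inr h''

lemma dot_not_mem_toChars (c : Int) : '.' ∉ PySem.Int.toChars c := by
  intro h
  have hd : ∀ n : Nat, '.' ∉ Nat.toDigits 10 n := by
    intro n hn
    rcases mem_toDigitsCore 10 _ _ _ _ hn with ⟨m, hm⟩ | h'
    · exact digitChar_ne_dot m hm.symm
    · exact List.not_mem_nil h'
  unfold PySem.Int.toChars at h
  split at h
  · rcases List.mem_cons.mp h with h' | h'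
    · exact absurd h' (by decide)
    · exact hd _ h'
  · exact hd _ h

lemma findgo_dot (pre : List Char) (h : '.' ∉ pre) :
    ∀ (suf : List Char) (k : Nat),
      PySem.Chars.find.go ['.'] (pre ++ '.' :: suf) k = (k : Int) + pre.length := by
  induction pre with
  | nil =>
    intro suf k
    simp only [List.nil_append, PySem.Chars.find.go]
    simp [List.isPrefixOf]
  | cons c pre ih =>
    intro suf k
    have hcc : c ≠ '.' := by
      simp only [List.mem_cons, not_or] at h
      exact fun hh => h.1 hh.symm
    have hc : ('.' == c) = false := beq_eq_false_iff_ne.mpr (Ne.symm hcc)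
    simp only [List.cons_append, PySem.Chars.find.go]
    rw [if_neg (by simp [List.isPrefixOf, hc])]
    rw [ih (by simp only [List.mem_cons, not_or] at h; exact h.2) suf (k + 1)]
    simp only [List.length_cons]
    push_cast
    ring

lemma find_dot (pre suf : List Char) (h : '.' ∉ pre) :
    PySem.Chars.find (pre ++ '.' :: suf) ['.'] = (pre.length : Int) := by
  simpa [PySem.Chars.find] using findgo_dot pre h suf 0

lemma dot_toList : (".").toList = ['.'] := rfl

lemma rwS_toList (p : String) (c : Int) (op : String) :
    (rwS p c op).toList
      = p.toList ++ PySem.Int.toChars c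
          ++ PySem.Chars.slice op.toList (some (PySem.Chars.find op.toList ['.'])) none := by
  simp [rwS, String.toList_append, PySem.Int.toList_toStr, PySem.Str.toList_slice,
    PySem.Str.find_eq, dot_toList, List.append_assoc]

lemma rwS_shape (p : String) (c : Int) (op : String) (hop : PySem.Str.isIn "." op = true) :
    ∃ u, (rwS p c op).toList = p.toList ++ PySem.Int.toChars c ++ '.' :: u := by
  have hinf : ['.'] <:+: op.toList := by
    have := (PySem.Str.isIn_iff_infix "." op).mp hop
    simpa [dot_toList] using this
  have hnn : 0 ≤ PySem.Chars.find op.toList ['.'] :=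
    (PySem.Chars.find_nonneg_iff _ _).mpr hinf
  obtain ⟨u, hu⟩ := (PySem.Chars.find_spec hnn).1
  refine ⟨u, ?_⟩
  rw [rwS_toList, PySem.Chars.slice_eq_listSlice, PySem.List.slice_from _ hnn, ← hu]
  simp

lemma sw_rwS (p : String) (c : Int) (op : String) :
    PySem.Str.startswith (rwS p c op) p = true := by
  rw [PySem.Str.startswith_eq, PySem.Chars.startswith_iff, rwS_toList]
  exact ⟨_, (List.append_assoc _ _ _).symm⟩

lemma sw_rwS_ne (p q : String) (pc qc : Char) (c : Int) (op : String)
    (hp : p.toList = [pc]) (hq : q.toList = [qc]) (hne : qc ≠ pc) :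
    PySem.Str.startswith (rwS p c op) q = false := by
  rw [PySem.Str.startswith_eq]
  have h := rwS_toList p c op
  rw [hp] at h
  rw [h, hq]
  simp [PySem.Chars.startswith, List.isPrefixOf, hne]

lemma sw_ne_char (p q : String) (pc qc : Char) (op : String)
    (hp : p.toList = [pc]) (hq : q.toList = [qc]) (hne : qc ≠ pc)
    (h : PySem.Str.startswith op p = true) :
    PySem.Str.startswith op q = false := by
  rw [PySem.Str.startswith_eq, hp, PySem.Chars.startswith_iff] at h
  obtain ⟨t, ht⟩ := h
  rw [PySem.Str.startswith_eq, hq, ← ht]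
  simp [PySem.Chars.startswith, List.isPrefixOf, hne]

lemma rwS_idem (p : String) (c : Int) (op : String)
    (hp : '.' ∉ p.toList) (hop : PySem.Str.isIn "." op = true) :
    rwS p c (rwS p c op) = rwS p c op := by
  obtain ⟨u, hu⟩ := rwS_shape p c op hop
  apply String.toList_inj.mp
  rw [rwS_toList, hu]
  have hpre : '.' ∉ p.toList ++ PySem.Int.toChars c := by
    simp only [List.mem_append, not_or]
    exact ⟨hp, dot_not_mem_toChars c⟩
  have hfind := find_dot _ u hpre
  rw [hfind, PySem.Chars.slice_eq_listSlice, PySem.List.slice_from _ (Int.natCast_nonneg _)]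
  rw [Int.toNat_natCast, List.drop_left]

lemma aPass_idem (p : String) (hp : '.' ∉ p.toList) :
    ∀ (t : List String) (c : Int),
      (∀ op ∈ t, PySem.Str.startswith op p = true → PySem.Str.isIn "." op = true) →
      aPass p c (aPass p c t) = aPass p c t := by
  intro t
  induction t with
  | nil => intro c _; rfl
  | cons op rest ih =>
    intro c hall
    by_cases h : PySem.Str.startswith op p = true
    · have hop := hall op (List.mem_cons_self) h
      simp only [aPass, h, if_true, rwS_fold, sw_rwS, rwS_idem p c op hp hop]
      exact congrArg _ (ih (c + 1) (fun o ho => hall o (List.mem_cons_of_mem _ ho)))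
    · simp only [aPass, h, if_false, Bool.false_eq_true]
      exact congrArg _ (ih c (fun o ho => hall o (List.mem_cons_of_mem _ ho)))

lemma pass_VZ : ∀ (t : List String) (cv cz : Int),
    aPass "Z" cz (aPass "V" cv t) = pass2 cv cz t := by
  intro t
  induction t with
  | nil => intro cv cz; rfl
  | cons op rest ih =>
    intro cv cz
    by_cases hV : PySem.Str.startswith op "V" = true
    · have hz : PySem.Str.startswith (rwS "V" cv op) "Z" = false :=
        sw_rwS_ne "V" "Z" 'V' 'Z' cv op rfl rfl (by decide)
      simp only [aPass, hV, if_true, rwS_fold, hz, Bool.false_eq_true, if_false, pass2, ih]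
    · by_cases hZ : PySem.Str.startswith op "Z" = true
      · simp only [aPass, hV, Bool.false_eq_true, if_false, hZ, if_true, rwS_fold, pass2, ih]
      · simp only [aPass, hV, hZ, Bool.false_eq_true, if_false, pass2, ih]

lemma bRenum_VZ (cv cz : Int) (op : String) :
    bRenum ["V", "Z"] (D2 cv cz) op =
      if PySem.Str.startswith op "V" then (rwS "V" cv op, D2 (cv + 1) cz)
      else if PySem.Str.startswith op "Z" then (rwS "Z" cz op, D2 cv (cz + 1))
      else (op, D2 cv cz) := by
  by_cases hV : PySem.Str.startswith op "V" = true
  · simp only [bRenum]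
    rw [if_pos hV, if_pos hV]
    simp [D2, PySem.Dict.get?, PySem.Dict.insert, PySem.Dict.contains]
    rfl
  · simp only [bRenum]
    rw [if_neg hV, if_neg hV]
    by_cases hZ : PySem.Str.startswith op "Z" = true
    · rw [if_pos hZ, if_pos hZ]
      simp [D2, PySem.Dict.get?, PySem.Dict.insert, PySem.Dict.contains]
      rfl
    · rw [if_neg hZ, if_neg hZ]

lemma bRenum_single (p : String) (c : Int) (op : String) :
    bRenum [p] (D1 p c) op =
      if PySem.Str.startswith op p then (rwS p c op, D1 p (c + 1))
      else (op, D1 p c) := by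
  by_cases h : PySem.Str.startswith op p = true
  · simp only [bRenum]
    rw [if_pos h, if_pos h]
    simp [D1, PySem.Dict.get?, PySem.Dict.insert, PySem.Dict.contains]
    rfl
  · simp only [bRenum]
    rw [if_neg h, if_neg h]

lemma foldB_VZ : ∀ (t acc : List String) (cv cz : Int),
    t.foldl (fun st op =>
        let r := bRenum ["V", "Z"] st.2 op
        (st.1 ++ [r.1], r.2)) (acc, D2 cv cz)
      = (acc ++ pass2 cv cz t,
         D2 (cv + ((t.countP fun op => PySem.Str.startswith op "V") : Int))
            (cz + ((t.countP fun op => PySem.Str.startswith op "Z") : Int))) := by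
  intro t
  induction t with
  | nil => intro acc cv cz; simp [pass2]
  | cons op rest ih =>
    intro acc cv cz
    rw [List.foldl_cons]
    by_cases hV : PySem.Str.startswith op "V" = true
    · have hZ : PySem.Str.startswith op "Z" = false :=
        sw_ne_char "V" "Z" 'V' 'Z' op rfl rfl (by decide) hV
      simp only [bRenum_VZ, hV, if_true]
      rw [ih]
      simp only [pass2, hV, if_true, List.countP_cons, hZ]
      rw [Prod.mk.injEq]
      refine ⟨by simp, ?_⟩
      simp only [D2, PySem.Dict.mk.injEq, List.cons.injEq, Prod.mk.injEq, and_true]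
      refine ⟨⟨trivial, by push_cast; ring⟩, trivial, by push_cast; ring⟩
    · by_cases hZ : PySem.Str.startswith op "Z" = true
      · simp only [bRenum_VZ, hV, Bool.false_eq_true, if_false, hZ, if_true]
        rw [ih]
        simp only [pass2, hV, Bool.false_eq_true, if_false, hZ, if_true, List.countP_cons]
        rw [Prod.mk.injEq]
        refine ⟨by simp, ?_⟩
        simp only [D2, PySem.Dict.mk.injEq, List.cons.injEq, Prod.mk.injEq, and_true]
        refine ⟨⟨trivial, by push_cast; ring⟩, trivial, by push_cast; ring⟩
      · simp only [bRenum_VZ, hV, hZ, Bool.false_eq_true, if_false]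
        rw [ih]
        simp only [pass2, hV, hZ, Bool.false_eq_true, if_false, List.countP_cons]
        rw [Prod.mk.injEq]
        refine ⟨by simp, ?_⟩
        simp only [D2, PySem.Dict.mk.injEq, List.cons.injEq, Prod.mk.injEq, and_true]
        refine ⟨⟨trivial, by push_cast; ring⟩, trivial, by push_cast; ring⟩

lemma foldB_single (p : String) : ∀ (t acc : List String) (c : Int),
    t.foldl (fun st op =>
        let r := bRenum [p] st.2 op
        (st.1 ++ [r.1], r.2)) (acc, D1 p c)
      = (acc ++ aPass p c t,
         D1 p (c + ((t.countP fun op => PySem.Str.startswith op p) : Int))) := by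
  intro t
  induction t with
  | nil => intro acc c; simp [aPass]
  | cons op rest ih =>
    intro acc c
    rw [List.foldl_cons]
    by_cases h : PySem.Str.startswith op p = true
    · simp only [bRenum_single, h, if_true]
      rw [ih]
      simp only [aPass, if_true, rwS_fold, List.countP_cons, h]
      rw [Prod.mk.injEq]
      refine ⟨by simp, ?_⟩
      simp only [D1, PySem.Dict.mk.injEq, List.cons.injEq, Prod.mk.injEq, and_true]
      refine ⟨trivial, by push_cast; ring⟩
    · simp only [bRenum_single, h, Bool.false_eq_true, if_false]
      rw [ih]
      simp only [aPass, h, Bool.false_eq_true, if_false, List.countP_cons]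
      rw [Prod.mk.injEq]
      refine ⟨by simp, ?_⟩
      simp only [D1, PySem.Dict.mk.injEq, List.cons.injEq, Prod.mk.injEq, and_true]
      refine ⟨trivial, by push_cast; ring⟩

lemma hcoVZ : PySem.Dict.ofList ((["V", "Z"]).map (fun p => (p, (0 : Int)))) = D2 0 0 := by
  decide

lemma hcoV : PySem.Dict.ofList ((["V"]).map (fun p => (p, (0 : Int)))) = D1 "V" 0 := by
  decide

lemma hcoZ : PySem.Dict.ofList ((["Z"]).map (fun p => (p, (0 : Int)))) = D1 "Z" 0 := by
  decide

-- ===== VERDICT (by name: the statement is the Claim_ definition above) =====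
theorem update_instr_spec : Claim_equal_update_instr := by
  unfold Claim_equal_update_instr Spec_update_instr
  intro instr _hdom hpre
  unfold Pre_update_instr prefixesOf at hpre
  unfold update_instr update_instr_alt
  by_cases h1 : PySem.Str.startswith (PySem.Str.strip instr) "TBL" = true
  · rw [if_pos h1] at hpre
    simp only [h1, List.any_cons, List.any_nil, Bool.true_or, Bool.or_false, Bool.not_true,
      Bool.false_eq_true, if_false, if_true, hcoVZ]
    rcases hp : PySem.Str.split₀ (PySem.Str.strip instr) with _ | ⟨h0, rest⟩
    · simp [aLoop]
    · rcases rest with _ | ⟨o0, t⟩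
      · simp [aLoop]
      · rw [hp] at hpre
        simp only [List.drop_succ_cons, List.drop_zero] at hpre
        simp only [List.take, List.drop]
        rw [foldB_VZ t [h0, o0] 0 0]
        simp only [aLoop, pass_VZ]
        rfl
  · by_cases h2 : PySem.Str.startswith (PySem.Str.strip instr) "TBX" = true
    · rw [if_neg h1, if_pos h2] at hpre
      simp only [h1, h2, List.any_cons, List.any_nil, Bool.false_or, Bool.true_or, Bool.or_false,
        Bool.not_true, Bool.false_eq_true, if_false, if_true, hcoV]
      rcases hp : PySem.Str.split₀ (PySem.Str.strip instr) with _ | ⟨h0, rest⟩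
      · simp [aLoop]
      · rcases rest with _ | ⟨o0, t⟩
        · simp [aLoop]
        · rw [hp] at hpre
          simp only [List.drop_succ_cons, List.drop_zero] at hpre
          have hall : ∀ op ∈ t, PySem.Str.startswith op "V" = true → PySem.Str.isIn "." op = true :=
            fun op hop => hpre "V" (by simp) op hop
          simp only [List.take, List.drop]
          rw [foldB_single "V" t [h0, o0] 0]
          simp only [aLoop, aPass_idem "V" (by decide) t 0 hall]
          rfl
    · by_cases h3 : (PySem.Str.startswith (PySem.Str.strip instr) "EXT"
          || PySem.Str.startswith (PySem.Str.strip instr) "SPLICE") = true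
      · rw [if_neg h1, if_neg h2, if_pos h3] at hpre
        simp only [h1, h2, h3, List.any_cons, List.any_nil, Bool.false_or, Bool.or_false,
          Bool.not_true, Bool.false_eq_true, if_false, if_true, hcoZ]
        rcases hp : PySem.Str.split₀ (PySem.Str.strip instr) with _ | ⟨h0, rest⟩
        · simp [aLoop]
        · rcases rest with _ | ⟨o0, t⟩
          · simp [aLoop]
          · rw [hp] at hpre
            simp only [List.drop_succ_cons, List.drop_zero] at hpre
            have hall : ∀ op ∈ t, PySem.Str.startswith op "Z" = true → PySem.Str.isIn "." op = true :=
              fun op hop => hpre "Z" (by simp) op hop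
            simp only [List.take, List.drop]
            rw [foldB_single "Z" t [h0, o0] 0]
            simp only [aLoop, aPass_idem "Z" (by decide) t 0 hall]
            rfl
      · simp only [h1, h2, h3, List.any_cons, List.any_nil, Bool.or_false,
          Bool.not_false, Bool.false_eq_true, if_false, if_true]
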